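-- pv_equiv track=rewrite | github.com/tishchennko/EGE | 25 задание ЕГЭ/another type/task-25.1867.py | f
-- ===== SOURCE A (Python) =====
-- def f(num):
--     res = set()
--     for i in range(2, int(num ** 0.5) + 1):
--         if num % i == 0:
--             res |= {i, num // i}
--     res = sorted(res)
--
--     for i in res:
--         if str(i)[-1] == '8' and i != 8:
--             return i
--     return 0
-- ===== SOURCE B (Python) =====
-- def f(num):
--     best = None
--     for i in range(2, int(num ** 0.5) + 1):
--         if num % i == 0:
--             for d in (i, num // i):
--                 if str(d)[-1] == '8' and d != 8:
--                     best = d if best is None else min(best, d)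
--     return best if best is not None else 0
-- ===== Notes on version B (the rewrite author's own statement) =====
-- stated objective: simpler
-- what changed: B drops A's set accumulation, sort and second search loop: one trial-division pass keeps a running minimum of the divisors that end in '8' and are not 8.
import Mathlib
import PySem

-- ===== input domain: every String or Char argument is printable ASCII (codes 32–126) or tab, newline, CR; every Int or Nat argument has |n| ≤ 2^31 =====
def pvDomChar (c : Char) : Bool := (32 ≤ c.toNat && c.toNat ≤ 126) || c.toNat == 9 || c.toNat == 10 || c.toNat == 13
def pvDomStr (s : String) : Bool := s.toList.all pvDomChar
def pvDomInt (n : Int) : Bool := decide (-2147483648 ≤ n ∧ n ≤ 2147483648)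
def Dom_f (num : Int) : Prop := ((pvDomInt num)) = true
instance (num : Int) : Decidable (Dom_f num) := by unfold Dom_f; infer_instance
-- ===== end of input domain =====

-- B replaces A's set + sort + second search loop by one pass keeping a running minimum (objective: simpler).

-- str(d)[-1] == '8' and d != 8 — the test both Pythons apply to a candidate divisor
def pvLast8 (d : Int) : Bool :=
  (PySem.Str.pyGet? (PySem.Int.toStr d) (-1) == some '8') && (d != 8)

-- ===== PORT A =====
-- second loop of A: first element of the sorted list passing the test, else 0
def pvFindA : List Int → Int
  | [] => 0
  | i :: rest => if pvLast8 i then i else pvFindA rest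

def f (num : Int) : Int :=
  -- int(num ** 0.5): on the admitted inputs (0 ≤ num ≤ 2^31) the float sqrt is exact, = Nat.sqrt
  let bound : Int := Int.ofNat (Nat.sqrt num.toNat)
  let res : PySem.Set Int :=
    (PySem.List.pyRange 2 (bound + 1) 1).foldl
      (fun s i =>
        if PySem.Int.mod num i = 0 then
          PySem.Set.union s (PySem.Set.ofList [i, PySem.Int.floordiv num i])  -- res |= {i, num//i}
        else s)
      PySem.Set.empty
  pvFindA (PySem.List.sorted res (fun x => x) false)

-- ===== PORT B =====
-- inner loop of B: fold the running minimum over candidate divisors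
def pvUpd (b : Option Int) (d : Int) : Option Int :=
  if pvLast8 d then
    match b with
    | none => some d
    | some m => some (min m d)
  else b

def f_alt (num : Int) : Int :=
  let bound : Int := Int.ofNat (Nat.sqrt num.toNat)
  let best : Option Int :=
    (PySem.List.pyRange 2 (bound + 1) 1).foldl
      (fun b i =>
        if PySem.Int.mod num i = 0 then
          [i, PySem.Int.floordiv num i].foldl pvUpd b   -- for d in (i, num // i): update best
        else b)
      none
  match best with
  | some b => b
  | none => 0

-- ===== PRECONDITION & SPEC =====
-- Pre_ excludes negative num: num ** 0.5 is then complex and int(...) raises TypeError in both programs.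
def Pre_f (num : Int) : Prop := 0 ≤ num
instance (num : Int) : Decidable (Pre_f num) := by unfold Pre_f; infer_instance
def pvWitness_f : Int := (48)

def Spec_f (num : Int) (out : Int) : Prop := out = f_alt num
instance (num : Int) (out : Int) : Decidable (Spec_f num out) := by unfold Spec_f; infer_instance

-- ===== CLAIM (what is proved, stated in full; the proofs are below) =====
def Claim_equal_f : Prop := ∀ (num : Int), Dom_f num → Pre_f num → Spec_f num (f num)

-- ===== LEMMAS AND PROOFS =====

-- the flat stream of candidate divisors produced by the trial-division loop
def pvStream (num : Int) (L : List Int) : List Int :=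
  L.flatMap (fun i => if PySem.Int.mod num i = 0 then [i, PySem.Int.floordiv num i] else [])

-- B's outer fold is the pvUpd-fold over the flat stream
theorem foldB_eq (num : Int) (L : List Int) (acc : Option Int) :
    L.foldl (fun b i =>
        if PySem.Int.mod num i = 0 then
          [i, PySem.Int.floordiv num i].foldl pvUpd b else b) acc
      = (pvStream num L).foldl pvUpd acc := by
  induction L generalizing acc with
  | nil => rfl
  | cons i L ih =>
    by_cases h : PySem.Int.mod num i = 0 <;>
      simp only [List.foldl_cons, pvStream, List.flatMap_cons, List.foldl_append, h,
        ite_true, ite_false, List.foldl_nil] <;> exact ih _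

-- membership in A's accumulated set = membership in the flat stream
theorem memA (num : Int) (L : List Int) (s : PySem.Set Int) (d : Int) :
    d ∈ L.foldl (fun s i =>
        if PySem.Int.mod num i = 0 then
          PySem.Set.union s (PySem.Set.ofList [i, PySem.Int.floordiv num i]) else s) s
      ↔ d ∈ s ∨ d ∈ pvStream num L := by
  induction L generalizing s with
  | nil => simp [pvStream]
  | cons i L ih =>
    simp only [List.foldl_cons, pvStream, List.flatMap_cons, List.mem_append]
    by_cases h : PySem.Int.mod num i = 0
    · simp only [h, ite_true, ih, PySem.Set.mem_union, PySem.Set.mem_ofList, pvStream]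
      simp only [List.mem_cons, List.not_mem_nil, or_false]
      tauto
    · simp [h, ih, pvStream]

-- the pvUpd-fold returns none iff nothing qualified
theorem upd_none (l : List Int) (acc : Option Int) :
    l.foldl pvUpd acc = none ↔ acc = none ∧ ∀ d ∈ l, pvLast8 d = false := by
  induction l generalizing acc with
  | nil => simp
  | cons d l ih =>
    simp only [List.foldl_cons, ih, List.mem_cons]
    unfold pvUpd
    by_cases h : pvLast8 d
    · constructor
      · rintro ⟨h1, -⟩; cases acc <;> simp [h] at h1
      · rintro ⟨-, h2⟩; exact absurd h (by simpa using h2 d (Or.inl rfl))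
    · simp only [h]
      constructor
      · rintro ⟨h1, h2⟩
        refine ⟨h1, ?_⟩
        rintro x (rfl | hx)
        · simpa using h
        · exact h2 x hx
      · rintro ⟨h1, h2⟩; exact ⟨h1, fun x hx => h2 x (Or.inr hx)⟩

-- the pvUpd-fold returning some m: m qualifies, comes from the list or acc, and is a lower bound
theorem upd_some (l : List Int) (acc : Option Int) (m : Int)
    (h : l.foldl pvUpd acc = some m) :
    ((pvLast8 m = true ∧ m ∈ l) ∨ acc = some m)
      ∧ (∀ d ∈ l, pvLast8 d = true → m ≤ d)
      ∧ (∀ a, acc = some a → m ≤ a) := by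
  induction l generalizing acc with
  | nil =>
    simp only [List.foldl_nil] at h
    exact ⟨Or.inr h, by simp, fun a ha => le_of_eq (Option.some.inj (h ▸ ha))⟩
  | cons d l ih =>
    simp only [List.foldl_cons] at h
    by_cases hp : pvLast8 d
    · cases acc with
      | none =>
        have hupd : pvUpd none d = some d := by unfold pvUpd; simp [hp]
        rw [hupd] at h
        obtain ⟨hsrc, hlb, hacc⟩ := ih _ h
        refine ⟨?_, ?_, ?_⟩
        · rcases hsrc with ⟨hm, hml⟩ | hsome
          · exact Or.inl ⟨hm, List.mem_cons_of_mem _ hml⟩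
          · have hmd : m = d := (Option.some.inj hsome).symm
            exact Or.inl ⟨hmd ▸ hp, hmd ▸ List.mem_cons_self⟩
        · intro x hx hxp
          rcases List.mem_cons.mp hx with rfl | hx
          · exact hacc _ rfl
          · exact hlb x hx hxp
        · intro a ha; simp at ha
      | some a =>
        have hupd : pvUpd (some a) d = some (min a d) := by unfold pvUpd; simp [hp]
        rw [hupd] at h
        obtain ⟨hsrc, hlb, hacc⟩ := ih _ h
        have hmad : m ≤ min a d := hacc _ rfl
        refine ⟨?_, ?_, ?_⟩
        · rcases hsrc with ⟨hm, hml⟩ | hsome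
          · exact Or.inl ⟨hm, List.mem_cons_of_mem _ hml⟩
          · have hsome' : min a d = m := Option.some.inj hsome
            rcases le_total a d with hle | hle
            · exact Or.inr (by rw [← hsome', min_eq_left hle])
            · have hmd : m = d := by rw [← hsome', min_eq_right hle]
              exact Or.inl ⟨hmd ▸ hp, hmd ▸ List.mem_cons_self⟩
        · intro x hx hxp
          rcases List.mem_cons.mp hx with rfl | hx
          · exact le_trans hmad (min_le_right _ _)
          · exact hlb x hx hxp
        · intro b hb
          have hba : a = b := Option.some.inj hb
          exact hba ▸ le_trans hmad (min_le_left _ _)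
    · have hupd : pvUpd acc d = acc := by unfold pvUpd; simp [hp]
      rw [hupd] at h
      obtain ⟨hsrc, hlb, hacc⟩ := ih _ h
      refine ⟨?_, ?_, hacc⟩
      · rcases hsrc with ⟨hm, hml⟩ | hsome
        · exact Or.inl ⟨hm, List.mem_cons_of_mem _ hml⟩
        · exact Or.inr hsome
      · intro x hx hxp
        rcases List.mem_cons.mp hx with rfl | hx
        · exact absurd hxp (by simpa using hp)
        · exact hlb x hx hxp

-- A's search loop on a list with no qualifying element
theorem findA_none (sl : List Int) (h : ∀ d ∈ sl, pvLast8 d = false) : pvFindA sl = 0 := by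
  induction sl with
  | nil => rfl
  | cons a t ih =>
    have ha := h a (List.mem_cons_self)
    simp only [pvFindA, ha, Bool.false_eq_true, ite_false]
    exact ih (fun d hd => h d (List.mem_cons_of_mem _ hd))

-- A's search loop on a ≤-sorted list returns the minimum qualifying element
theorem findA_min (sl : List Int) (hs : sl.Pairwise (· ≤ ·)) (m : Int)
    (hm : m ∈ sl) (hmp : pvLast8 m = true) (hlb : ∀ d ∈ sl, pvLast8 d = true → m ≤ d) :
    pvFindA sl = m := by
  induction sl with
  | nil => cases hm
  | cons a t ih =>
    rw [List.pairwise_cons] at hs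
    by_cases hp : pvLast8 a
    · have h1 : m ≤ a := hlb a (List.mem_cons_self) hp
      have h2 : a ≤ m := by
        rcases List.mem_cons.mp hm with rfl | hmt
        · exact le_refl _
        · exact hs.1 m hmt
      have ham : a = m := le_antisymm h2 h1
      subst ham
      simp [pvFindA, hp]
    · have hma : m ≠ a := by rintro rfl; exact hp hmp
      have hmt : m ∈ t := by rcases List.mem_cons.mp hm with rfl | h; exact absurd rfl hma; exact h
      simp only [pvFindA, hp, Bool.false_eq_true, ite_false]
      exact ih hs.2 hmt (fun d hd => hlb d (List.mem_cons_of_mem _ hd))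

-- ===== VERDICT (by name: the statement is the Claim_ definition above) =====
theorem f_spec : Claim_equal_f := by
  intro num _ _
  unfold Spec_f f f_alt
  simp only [foldB_eq]
  set L := PySem.List.pyRange 2 ((Int.ofNat (Nat.sqrt num.toNat)) + 1) 1 with hL
  set S := L.foldl (fun s i =>
      if PySem.Int.mod num i = 0 then
        PySem.Set.union s (PySem.Set.ofList [i, PySem.Int.floordiv num i]) else s)
    PySem.Set.empty with hS
  set sl := PySem.List.sorted S (fun x => x) false with hsl
  have hmemS : ∀ d, d ∈ S ↔ d ∈ pvStream num L := by
    intro d; rw [hS, memA]; simp [PySem.Set.empty]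
  have hmemsl : ∀ d, d ∈ sl ↔ d ∈ pvStream num L := by
    intro d; rw [hsl, PySem.List.mem_sorted]; exact hmemS d
  have hpair : sl.Pairwise (· ≤ ·) := by
    simpa using PySem.List.sorted_pairwise S (fun x => x) (κ := Int)
  cases hfold : (pvStream num L).foldl pvUpd none with
  | none =>
    show pvFindA sl = 0
    have hnone := (upd_none _ _).mp hfold
    exact findA_none sl (fun d hd => hnone.2 d ((hmemsl d).mp hd))
  | some m =>
    show pvFindA sl = m
    obtain ⟨hsrc, hlb, -⟩ := upd_some _ _ _ hfold
    rcases hsrc with ⟨hmp, hml⟩ | habs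
    · exact findA_min sl hpair m ((hmemsl m).mpr hml) hmp
        (fun d hd => hlb d ((hmemsl d).mp hd))
    · cases habs
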